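-- pv_equiv track=rewrite | github.com/13058315168/ArcMap-vs-ArcGISPro-Benchmark | utils/benchmark_shapes.py | factor_grid_dimensions
-- ===== SOURCE A (Python) =====
-- import math
--
-- def factor_grid_dimensions(total_count):
--     """Return exact integer grid dimensions whose product equals total_count.
--
--     The returned pair is chosen to be as square as possible while still
--     multiplying to the requested count. If no better factor exists, it falls
--     back to ``1 x total_count``.
--     """
--     total_count = int(total_count or 0)
--     if total_count <= 0:
--         raise ValueError("total_count must be positive")
--
--     root = int(math.sqrt(total_count))
--     for rows in range(root, 0, -1):
--         if total_count % rows == 0: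
--             cols = total_count // rows
--             return rows, cols
--
--     return 1, total_count
-- ===== SOURCE B (Python) =====
-- import math
--
-- def factor_grid_dimensions(total_count):
--     """Build every factor pair (d, total_count // d) for d up to the integer
--     square root, then select the pair with the smallest cols-rows gap."""
--     total_count = int(total_count or 0)
--     if total_count <= 0:
--         raise ValueError("total_count must be positive")
--
--     root = int(math.sqrt(total_count))
--     pairs = [(d, total_count // d) for d in range(1, root + 1)
--              if total_count % d == 0]
--     best = pairs[0]          # d = 1 always divides, so pairs is non-empty
--     for p in pairs[1:]:
--         if p[1] - p[0] < best[1] - best[0]: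
--             best = p
--     return best
-- ===== Notes on version B (the rewrite author's own statement) =====
-- stated objective: alternative
-- what changed: A returns on the first divisor found scanning downward from the integer square root; B builds the full list of factor pairs scanning upward and selects the pair with the smallest cols-rows gap.
import Mathlib
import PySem

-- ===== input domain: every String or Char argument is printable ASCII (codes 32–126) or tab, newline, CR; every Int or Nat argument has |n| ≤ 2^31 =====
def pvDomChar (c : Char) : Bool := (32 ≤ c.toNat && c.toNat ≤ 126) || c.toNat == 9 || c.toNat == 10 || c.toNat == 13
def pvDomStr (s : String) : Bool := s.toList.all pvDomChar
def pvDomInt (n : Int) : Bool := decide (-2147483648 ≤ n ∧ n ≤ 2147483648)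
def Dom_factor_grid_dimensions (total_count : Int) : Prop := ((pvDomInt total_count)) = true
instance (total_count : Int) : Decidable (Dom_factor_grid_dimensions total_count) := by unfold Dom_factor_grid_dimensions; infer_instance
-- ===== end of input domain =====

-- B builds all factor pairs up to the integer root and selects the min-gap one, instead of
-- A's downward scan with early return (objective: alternative decomposition, same cost).

-- ===== PORT A =====
-- 'for rows in range(root, 0, -1): if n % rows == 0: return rows, n // rows'
-- as a countdown recursion; fuel value = current 'rows'.
def pvLoopA (n : Int) : Nat → Int × Int
  | 0 => (1, n)                         -- loop fell through: 'return 1, total_count'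
  | r + 1 =>
      if PySem.Int.mod n ((r : Int) + 1) = 0 then
        ((r : Int) + 1, PySem.Int.floordiv n ((r : Int) + 1))
      else pvLoopA n r

def factor_grid_dimensions (total_count : Int) : Int × Int :=
  -- 'int(total_count or 0)' is the identity on ints; the ValueError branch is excluded by Pre_.
  -- 'int(math.sqrt(total_count))' is exact (= isqrt) for 0 < total_count ≤ 2^31 (Dom), ported as Nat.sqrt.
  let root : Nat := total_count.toNat.sqrt
  pvLoopA total_count root

-- ===== PORT B =====
def pvGap (p : Int × Int) : Int := p.2 - p.1

-- '[(d, n // d) for d in range(1, r+1) if n % d == 0]'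
def pvPairs (n : Int) (r : Nat) : List (Int × Int) :=
  (PySem.List.pyRange 1 ((r : Int) + 1) 1).filterMap
    (fun d => if PySem.Int.mod n d = 0 then some (d, PySem.Int.floordiv n d) else none)

-- 'best = pairs[0]; for p in pairs[1:]: if p[1]-p[0] < best[1]-best[0]: best = p'
def pvBest (b : Int × Int) : List (Int × Int) → Int × Int
  | [] => b
  | p :: ps => pvBest (if pvGap p < pvGap b then p else b) ps

def factor_grid_dimensions_alt (total_count : Int) : Int × Int :=
  let root : Nat := total_count.toNat.sqrt
  match pvPairs total_count root with
  | [] => (1, total_count)   -- unreachable under Pre_ (d = 1 always divides); guard for totality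
  | p :: ps => pvBest p ps

-- ===== PRECONDITION & SPEC =====
-- Pre_ excludes exactly total_count ≤ 0, where A raises ValueError (B raises there too).
def Pre_factor_grid_dimensions (total_count : Int) : Prop := 0 < total_count
instance (total_count : Int) : Decidable (Pre_factor_grid_dimensions total_count) := by
  unfold Pre_factor_grid_dimensions; infer_instance
def pvWitness_factor_grid_dimensions : Int := 12

def Spec_factor_grid_dimensions (total_count : Int) (out : Int × Int) : Prop :=
  out = factor_grid_dimensions_alt total_count
instance (total_count : Int) (out : Int × Int) : Decidable (Spec_factor_grid_dimensions total_count out) := by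
  unfold Spec_factor_grid_dimensions; infer_instance

-- ===== CLAIM (what is proved, stated in full; the proofs are below) =====
def Claim_equal_factor_grid_dimensions : Prop :=
  ∀ (total_count : Int), Dom_factor_grid_dimensions total_count →
    Pre_factor_grid_dimensions total_count →
    Spec_factor_grid_dimensions total_count (factor_grid_dimensions total_count)

-- ===== LEMMAS AND PROOFS =====

theorem pvBest_append (b : Int × Int) (l : List (Int × Int)) (p : Int × Int) :
    pvBest b (l ++ [p]) =
      (if pvGap p < pvGap (pvBest b l) then p else pvBest b l) := by
  induction l generalizing b with
  | nil => simp [pvBest]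
  | cons q t ih => simp [pvBest, ih]

-- the joint invariant: after scanning divisors 1..r, A's loop result is some divisor pair
-- (k, n/k), and B's pairs list starts with (1, n) and its running min equals A's result
theorem pv_invariant (n : Int) (root : Nat)
    (hroot : (root : Int) * (root : Int) ≤ n) :
    ∀ r : Nat, 1 ≤ r → r ≤ root →
      ∃ rest : List (Int × Int), pvPairs n r = (1, n) :: rest ∧
        ∃ k : Nat, 1 ≤ k ∧ k ≤ r ∧ ((k : Int)) ∣ n ∧
          pvLoopA n r = ((k : Int), n / (k : Int)) ∧
          pvBest (1, n) rest = pvLoopA n r := by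
  intro r
  induction r with
  | zero => intro h; omega
  | succ r ih =>
    intro _ hle
    by_cases hr0 : r = 0
    · subst hr0
      refine ⟨[], ?_, 1, le_refl 1, le_refl 1, one_dvd n, ?_, ?_⟩
      · show (PySem.List.pyRange 1 2 1).filterMap _ = _
        rw [show (2 : Int) = 1 + 1 by norm_num, PySem.List.pyRange_one_singleton]
        simp [List.filterMap, PySem.Int.floordiv]
      · simp [pvLoopA, PySem.Int.floordiv]
      · simp [pvBest, pvLoopA, PySem.Int.floordiv]
    · have hr1 : 1 ≤ r := by omega
      obtain ⟨rest, hpairs, k, hk1, hkr, hkdvd, hloop, hbest⟩ := ih hr1 (by omega)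
      have hd : (0 : Int) < (r : Int) + 1 := by positivity
      have hsplit : pvPairs n (r + 1) =
          pvPairs n r ++ (if ((r : Int) + 1) ∣ n then
            [((r : Int) + 1, PySem.Int.floordiv n ((r : Int) + 1))] else []) := by
        unfold pvPairs
        rw [show ((r + 1 : Nat) : Int) + 1 = ((r : Int) + 1) + 1 by push_cast; ring,
          PySem.List.pyRange_one_succ_right (by omega), List.filterMap_append]
        by_cases h : ((r : Int) + 1) ∣ n <;> simp [List.filterMap, h]
      by_cases hdvd : ((r : Int) + 1) ∣ n
      · -- r+1 divides: it becomes both A's answer and B's new running min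
        have hfd : PySem.Int.floordiv n ((r : Int) + 1) = n / ((r : Int) + 1) :=
          PySem.Int.floordiv_eq_ediv_of_pos hd
        have hloop' : pvLoopA n (r + 1) = ((r : Int) + 1, n / ((r : Int) + 1)) := by
          simp [pvLoopA, hdvd]
        -- strict gap decrease: n/(r+1) - (r+1) < n/k - k
        have hkpos : (0 : Int) < (k : Int) := by exact_mod_cast hk1
        have ha : (k : Int) * (n / (k : Int)) = n := Int.mul_ediv_cancel' hkdvd
        have hb : ((r : Int) + 1) * (n / ((r : Int) + 1)) = n := Int.mul_ediv_cancel' hdvd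
        have hkrI : (k : Int) ≤ (r : Int) := by exact_mod_cast hkr
        have hrrootI : (r : Int) + 1 ≤ (root : Int) := by exact_mod_cast (by omega : r + 1 ≤ root)
        have hsmall : (k : Int) * ((r : Int) + 1) < n := by nlinarith
        have hra : (r : Int) + 1 < n / (k : Int) := by nlinarith
        have hba : n / ((r : Int) + 1) < n / (k : Int) := by nlinarith
        have hkb : (k : Int) < n / ((r : Int) + 1) := by nlinarith
        have hgap : pvGap ((r : Int) + 1, n / ((r : Int) + 1)) <
            pvGap ((k : Int), n / (k : Int)) := by
          simp only [pvGap]; omega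
        refine ⟨rest ++ [((r : Int) + 1, PySem.Int.floordiv n ((r : Int) + 1))],
          by rw [hsplit, hpairs, if_pos hdvd]; simp, r + 1, by omega, le_refl _, ?_, ?_, ?_⟩
        · exact_mod_cast hdvd
        · push_cast; exact hloop'
        · rw [pvBest_append, hbest, hloop, hfd, hloop']
          rw [if_pos hgap]
      · refine ⟨rest, by rw [hsplit, hpairs, if_neg hdvd]; simp, k, hk1, by omega, hkdvd, ?_, ?_⟩
        · simp [pvLoopA, hdvd, hloop]
        · rw [hbest]; simp [pvLoopA, hdvd]

-- ===== VERDICT (by name: the statement is the Claim_ definition above) =====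
theorem factor_grid_dimensions_spec : Claim_equal_factor_grid_dimensions := by
  intro n _ hpre
  show factor_grid_dimensions n = factor_grid_dimensions_alt n
  have hn : 0 < n := hpre
  have hrootpos : 1 ≤ n.toNat.sqrt := by
    have h0 : 0 < n.toNat := by omega
    have := Nat.sqrt_pos.mpr h0
    omega
  have hrootsq : ((n.toNat.sqrt : Nat) : Int) * ((n.toNat.sqrt : Nat) : Int) ≤ n := by
    have h := Nat.sqrt_le' n.toNat
    rw [pow_two] at h
    have h2 : ((n.toNat.sqrt * n.toNat.sqrt : Nat) : Int) ≤ ((n.toNat : Nat) : Int) := by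
      exact_mod_cast h
    push_cast at h2
    omega
  obtain ⟨rest, hpairs, k, _, _, _, _, hbest⟩ :=
    pv_invariant n n.toNat.sqrt hrootsq n.toNat.sqrt hrootpos (le_refl _)
  simp only [factor_grid_dimensions, factor_grid_dimensions_alt]
  rw [hpairs]
  simp only
  rw [hbest]
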